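-- pv_equiv track=rewrite | github.com/hkg109/plant | python/[수1] 암호화.py | exponentiate_numbers
-- ===== SOURCE A (Python) =====
-- def modular_exponentiation(base, exponent, mod):
--     result = 1
--     base = base % mod
--     while exponent > 0:
--         if (exponent % 2) == 1:
--             result = (result * base) % mod
--         exponent = exponent >> 1
--         base = (base * base) % mod
--     return result
--
-- def exponentiate_numbers(number_sentence, key, mod):
--     number_words = number_sentence.split()
--     exponentiated_words = []
--
--     for number_word in number_words:
--         number = int(number_word)
--         exponentiated_number = modular_exponentiation(number, key, mod)  # 제곱 후 모듈러 연산
--         exponentiated_word = "{:04d}".format(exponentiated_number)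
--         exponentiated_words.append(exponentiated_word)
--
--     return ' '.join(exponentiated_words)
-- ===== SOURCE B (Python) =====
-- def _fast_mod_exp(base, e, mod):
--     # recursive divide-and-conquer fast exponentiation (e <= 0 -> 1, like A's loop)
--     if e <= 0:
--         return 1
--     base %= mod
--     half = _fast_mod_exp(base, e // 2, mod)
--     half = (half * half) % mod
--     return half * base % mod if e % 2 else half
--
--
-- def exponentiate_numbers(number_sentence, key, mod):
--     return ' '.join('{:04d}'.format(_fast_mod_exp(int(w), key, mod))
--                     for w in number_sentence.split())
-- ===== Notes on version B (the rewrite author's own statement) =====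
-- stated objective: alternative
-- what changed: The iterative accumulate-and-square binary-exponentiation loop is replaced by a recursive divide-and-conquer fast-exponentiation helper (recurse on e//2, square the result, multiply by the base on odd exponents), and the explicit append-loop over words becomes a join over a generator expression.
import Mathlib
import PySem

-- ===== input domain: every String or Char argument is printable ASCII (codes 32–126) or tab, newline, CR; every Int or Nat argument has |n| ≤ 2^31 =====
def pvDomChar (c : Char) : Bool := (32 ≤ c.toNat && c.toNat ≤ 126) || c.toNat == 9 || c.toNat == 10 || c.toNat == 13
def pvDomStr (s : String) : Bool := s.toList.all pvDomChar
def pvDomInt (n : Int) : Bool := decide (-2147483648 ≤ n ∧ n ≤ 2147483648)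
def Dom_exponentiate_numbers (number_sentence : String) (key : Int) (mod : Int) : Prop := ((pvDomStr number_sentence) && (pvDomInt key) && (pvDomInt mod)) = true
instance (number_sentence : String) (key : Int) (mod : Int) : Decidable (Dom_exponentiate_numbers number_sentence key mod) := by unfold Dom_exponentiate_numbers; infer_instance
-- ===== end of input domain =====

-- B replaces A's iterative binary-exponentiation loop by a recursive divide-and-conquer
-- fast-exponentiation helper and the append-loop by a join over a mapped generator (objective: alternative).

-- ===== PORT A =====

-- used by the port's decreasing_by: exponent >> 1 is flooring division by 2
theorem pvShiftr1_eq_fdiv (e : Int) : e >>> (1:Nat) = e.fdiv 2 := by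
  rw [Int.shiftRight_eq]
  rcases e with n | n <;>
    simp only [Int.shiftRight, Nat.shiftRight_succ, Nat.shiftRight_zero, Int.fdiv] <;>
    rcases n with _ | m <;> rfl

theorem pvFdiv2 (e : Int) : e.fdiv 2 = e / 2 := by rw [Int.fdiv_eq_ediv]; simp

-- the while-loop of modular_exponentiation, state (result, base, exponent)
def modExpLoop (result base exponent m : Int) : Int :=
  if _h : exponent > 0 then
    modExpLoop
      (if PySem.Int.mod exponent 2 = 1 then PySem.Int.mod (result * base) m else result)
      (PySem.Int.mod (base * base) m)
      (exponent >>> (1:Nat)) m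
  else result
termination_by exponent.toNat
decreasing_by
  rw [pvShiftr1_eq_fdiv, pvFdiv2]
  omega

def modular_exponentiation (base exponent m : Int) : Int :=
  modExpLoop 1 (PySem.Int.mod base m) exponent m

def exponentiate_numbers (number_sentence : String) (key : Int) (mod : Int) : String :=
  let number_words := PySem.Str.split₀ number_sentence
  let exponentiated_words := number_words.foldl (fun acc number_word =>
    -- int(number_word): none = ValueError, excluded by Pre_
    let number := (PySem.Int.ofStr? number_word).getD 0
    let exponentiated_number := modular_exponentiation number key mod
    -- "{:04d}".format(n) = str(n).zfill(4), exact for ints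
    acc ++ [PySem.Str.zfill (PySem.Int.toStr exponentiated_number) 4]) []
  PySem.Str.join " " exponentiated_words

-- ===== PORT B =====

def fastModExp (base e m : Int) : Int :=
  if _h : e ≤ 0 then 1
  else
    let b := PySem.Int.mod base m
    let half := fastModExp b (PySem.Int.floordiv e 2) m
    let half2 := PySem.Int.mod (half * half) m
    if PySem.Int.mod e 2 ≠ 0 then PySem.Int.mod (half2 * b) m else half2
termination_by e.toNat
decreasing_by
  simp only [PySem.Int.floordiv]
  rw [pvFdiv2]
  omega

def exponentiate_numbers_alt (number_sentence : String) (key : Int) (mod : Int) : String :=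
  PySem.Str.join " "
    ((PySem.Str.split₀ number_sentence).map (fun w =>
      PySem.Str.zfill (PySem.Int.toStr (fastModExp ((PySem.Int.ofStr? w).getD 0) key mod)) 4))

-- ===== PRECONDITION & SPEC =====
-- Pre_ excludes exactly the inputs where Python raises: a word int() rejects (ValueError),
-- and mod = 0 with at least one word (ZeroDivisionError in %).
def Pre_exponentiate_numbers (number_sentence : String) (key : Int) (mod : Int) : Prop :=
  (∀ w ∈ PySem.Str.split₀ number_sentence, (PySem.Int.ofStr? w).isSome) ∧
  (PySem.Str.split₀ number_sentence = [] ∨ mod ≠ 0)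
instance (number_sentence : String) (key : Int) (mod : Int) : Decidable (Pre_exponentiate_numbers number_sentence key mod) := by unfold Pre_exponentiate_numbers; infer_instance

def pvWitness_exponentiate_numbers : String × Int × Int := ("3 10", 5, 7)

def Spec_exponentiate_numbers (number_sentence : String) (key : Int) (mod : Int) (out : String) : Prop := out = exponentiate_numbers_alt number_sentence key mod
instance (number_sentence : String) (key : Int) (mod : Int) (out : String) : Decidable (Spec_exponentiate_numbers number_sentence key mod out) := by unfold Spec_exponentiate_numbers; infer_instance

-- ===== CLAIM (what is proved, stated in full; the proofs are below) =====
def Claim_equal_exponentiate_numbers : Prop := ∀ (number_sentence : String) (key : Int) (mod : Int), Dom_exponentiate_numbers number_sentence key mod → Pre_exponentiate_numbers number_sentence key mod → Spec_exponentiate_numbers number_sentence key mod (exponentiate_numbers number_sentence key mod)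

-- ===== LEMMAS AND PROOFS =====

-- fmod respects congruence mod m, in the forms the two helpers produce
theorem fmod_mul_left (x y m : Int) : ((x.fmod m) * y).fmod m = (x * y).fmod m := by
  conv_rhs => rw [show x = x.fmod m + m * x.fdiv m by rw [Int.fmod_def]; ring]
  rw [show (x.fmod m + m * x.fdiv m) * y = x.fmod m * y + m * (x.fdiv m * y) by ring]
  rw [Int.add_mul_fmod_self_left]

theorem fmod_mul_right (x y m : Int) : (y * (x.fmod m)).fmod m = (y * x).fmod m := by
  rw [mul_comm y, mul_comm y, fmod_mul_left]

theorem fmod_fmod (x m : Int) : (x.fmod m).fmod m = x.fmod m := by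
  have := fmod_mul_left x 1 m
  simpa using this

theorem fmod_mul_mul (a b m : Int) : ((a.fmod m) * (b.fmod m)).fmod m = (a * b).fmod m := by
  rw [fmod_mul_left, fmod_mul_right]

theorem fmod_pow (x m : Int) (k : Nat) : ((x.fmod m) ^ k).fmod m = (x ^ k).fmod m := by
  induction k with
  | zero => simp
  | succ n ih =>
    rw [pow_succ, pow_succ, fmod_mul_right]
    conv_lhs => rw [← fmod_mul_left]
    rw [ih, fmod_mul_left]

theorem fmod_mul_pow (y x m : Int) (k : Nat) :
    (y * (x.fmod m) ^ k).fmod m = (y * x ^ k).fmod m := by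
  conv_lhs => rw [← fmod_mul_right]
  rw [fmod_pow, fmod_mul_right]

theorem pvFmod2 (e : Int) : e.fmod 2 = e % 2 := by rw [Int.fmod_eq_emod]; simp

-- A's loop computes (r * b^e) % m for positive e
theorem modExpLoop_nonpos (r b e m : Int) (h : ¬ e > 0) : modExpLoop r b e m = r := by
  rw [modExpLoop]; simp [h]

theorem modExpLoop_pos (m : Int) : ∀ (n : Nat) (e r b : Int), e.toNat = n → 0 < e →
    modExpLoop r b e m = (r * b ^ e.toNat).fmod m := by
  intro n
  induction n using Nat.strong_induction_on with
  | _ n ih =>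
    intro e r b hn he
    have hfd : e.fdiv 2 = e / 2 := pvFdiv2 e
    have hfm : e.fmod 2 = e % 2 := pvFmod2 e
    rw [modExpLoop]
    simp only [he, dif_pos, pvShiftr1_eq_fdiv, PySem.Int.mod]
    by_cases hq : 0 < e.fdiv 2
    · rw [ih (e.fdiv 2).toNat (by omega) _ _ _ rfl hq, fmod_mul_pow]
      by_cases ho : e.fmod 2 = 1
      · have hk : e.toNat = 2 * (e.fdiv 2).toNat + 1 := by omega
        rw [if_pos ho, fmod_mul_left]
        congr 1
        rw [hk]
        ring
      · have hk : e.toNat = 2 * (e.fdiv 2).toNat := by omega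
        rw [if_neg ho]
        congr 1
        rw [hk]
        ring
    · -- e = 1
      have he1 : e = 1 := by omega
      subst he1
      rw [if_pos (by decide), modExpLoop_nonpos _ _ _ _ (by rw [show ((1:Int).fdiv 2) = 0 by decide]; omega)]
      norm_num

-- B's recursion computes (b % m)^e % m for positive e
theorem fastModExp_pos (m : Int) : ∀ (n : Nat) (e b : Int), e.toNat = n → 0 < e →
    fastModExp b e m = ((b.fmod m) ^ e.toNat).fmod m := by
  intro n
  induction n using Nat.strong_induction_on with
  | _ n ih =>
    intro e b hn he
    have hfd : e.fdiv 2 = e / 2 := pvFdiv2 e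
    have hfm : e.fmod 2 = e % 2 := pvFmod2 e
    rw [fastModExp]
    simp only [show ¬ e ≤ 0 by omega, dif_neg, not_false_iff,
      PySem.Int.mod, PySem.Int.floordiv]
    by_cases hq : 0 < e.fdiv 2
    · rw [ih (e.fdiv 2).toNat (by omega) _ _ rfl hq, fmod_fmod b m]
      by_cases ho : e.fmod 2 = 1
      · have hk : e.toNat = 2 * (e.fdiv 2).toNat + 1 := by omega
        rw [if_pos (by rw [ho]; norm_num),
            fmod_mul_mul ((b.fmod m) ^ (e.fdiv 2).toNat) ((b.fmod m) ^ (e.fdiv 2).toNat) m,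
            fmod_mul_left ((b.fmod m) ^ (e.fdiv 2).toNat * (b.fmod m) ^ (e.fdiv 2).toNat) (b.fmod m) m]
        congr 1
        rw [hk]
        ring
      · have hk : e.toNat = 2 * (e.fdiv 2).toNat := by omega
        rw [if_neg (by rw [show e.fmod 2 = 0 by omega]; norm_num),
            fmod_mul_mul ((b.fmod m) ^ (e.fdiv 2).toNat) ((b.fmod m) ^ (e.fdiv 2).toNat) m]
        congr 1
        rw [hk]
        ring
    · -- e = 1
      have he1 : e = 1 := by omega
      subst he1
      have hF : fastModExp (b.fmod m) ((1:Int).fdiv 2) m = 1 := by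
        rw [fastModExp, dif_pos (by decide : (1:Int).fdiv 2 ≤ 0)]
      rw [hF, if_pos (by decide : Int.fmod 1 2 ≠ 0),
          show ((1:Int) * 1) = 1 by norm_num, fmod_mul_left 1 (b.fmod m) m, one_mul,
          fmod_fmod]
      norm_num [fmod_fmod]

-- the two helpers agree on every input (m = 0 included: fmod _ 0 is the identity)
theorem helpers_eq (b e m : Int) : modular_exponentiation b e m = fastModExp b e m := by
  by_cases he : 0 < e
  · rw [modular_exponentiation, modExpLoop_pos m e.toNat e 1 (PySem.Int.mod b m) rfl he,
        fastModExp_pos m e.toNat e b rfl he]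
    simp only [PySem.Int.mod, one_mul]
  · rw [modular_exponentiation, modExpLoop_nonpos _ _ _ _ he, fastModExp]
    simp [show e ≤ 0 by omega]

-- ===== VERDICT (by name: the statement is the Claim_ definition above) =====
theorem exponentiate_numbers_spec : Claim_equal_exponentiate_numbers := by
  intro ns key m _ _
  unfold Spec_exponentiate_numbers exponentiate_numbers exponentiate_numbers_alt
  simp only []
  rw [PySem.List.foldl_append_singleton_eq_map]
  simp only [List.nil_append]
  congr 1
  apply List.map_congr_left
  intro w _
  rw [helpers_eq]
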